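-- pv_equiv track=rewrite | github.com/RaimundOlate/Evaluacion3 | final.py | filtrar_personajes
-- ===== SOURCE A (Python) =====
-- def filtrar_personajes(personajes, tipo):
--     magos = []
--     cientificos = []
--     otros = []
--     for x in personajes:
--         if x == 'Harry Houdini' or x == 'Teller' or x == 'David Blane':
--             magos.append(x)
--         elif x == 'Newton' or x == 'Hawking' or x == 'Einstein':
--             cientificos.append(x)
--         else:
--             otros.append(x)
--
--     if tipo == 'magos':
--         return magos
--     elif tipo == 'cientificos':
--         return cientificos
--     else:
--         return otros
-- ===== SOURCE B (Python) =====
-- MAGOS = {'Harry Houdini', 'Teller', 'David Blane'}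
-- CIENTIFICOS = {'Newton', 'Hawking', 'Einstein'}
--
-- def filtrar_personajes(personajes, tipo):
--     if tipo == 'magos':
--         pred = lambda x: x in MAGOS
--     elif tipo == 'cientificos':
--         pred = lambda x: x in CIENTIFICOS
--     else:
--         pred = lambda x: x not in MAGOS and x not in CIENTIFICOS
--     return [x for x in personajes if pred(x)]
-- ===== Notes on version B (the rewrite author's own statement) =====
-- stated objective: simpler
-- what changed: B picks the category predicate once from tipo, then filters personajes in one comprehension, instead of A's classification of every element into three accumulating lists followed by a final selection branch.
import Mathlib
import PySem

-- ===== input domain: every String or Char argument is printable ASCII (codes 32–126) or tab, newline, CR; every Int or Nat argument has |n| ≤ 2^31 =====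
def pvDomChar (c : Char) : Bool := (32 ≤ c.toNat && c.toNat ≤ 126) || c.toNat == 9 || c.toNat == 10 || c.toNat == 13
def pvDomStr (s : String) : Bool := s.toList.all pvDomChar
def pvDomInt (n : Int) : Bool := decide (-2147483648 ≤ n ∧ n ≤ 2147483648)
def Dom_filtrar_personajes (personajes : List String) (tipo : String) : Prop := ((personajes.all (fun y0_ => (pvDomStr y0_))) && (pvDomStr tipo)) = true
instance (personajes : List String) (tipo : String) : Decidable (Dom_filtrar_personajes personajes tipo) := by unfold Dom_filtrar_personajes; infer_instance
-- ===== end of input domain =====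

-- B selects the category predicate from tipo once, then filters in a single pass;
-- A classifies every element into three lists and selects one at the end. Objective: simpler.


-- ===== PORT A =====
-- Literal transliteration: the loop accumulates the three lists (magos, cientificos, otros),
-- then tipo selects which one is returned.
def filtrar_personajes (personajes : List String) (tipo : String) : List String :=
  let st := personajes.foldl (fun (acc : List String × List String × List String) x =>
      let (magos, cientificos, otros) := acc
      if x == "Harry Houdini" || x == "Teller" || x == "David Blane" then
        (magos ++ [x], cientificos, otros)
      else if x == "Newton" || x == "Hawking" || x == "Einstein" then
        (magos, cientificos ++ [x], otros)
      else
        (magos, cientificos, otros ++ [x])) ([], [], [])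
  if tipo == "magos" then st.1
  else if tipo == "cientificos" then st.2.1
  else st.2.2

-- ===== PORT B =====
def pvMagos : PySem.Set String := PySem.Set.ofList ["Harry Houdini", "Teller", "David Blane"]
def pvCientificos : PySem.Set String := PySem.Set.ofList ["Newton", "Hawking", "Einstein"]

def filtrar_personajes_alt (personajes : List String) (tipo : String) : List String :=
  let pred : String → Bool :=
    if tipo == "magos" then fun x => pvMagos.contains x
    else if tipo == "cientificos" then fun x => pvCientificos.contains x
    else fun x => !pvMagos.contains x && !pvCientificos.contains x
  personajes.filter pred

-- ===== PRECONDITION & SPEC =====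
def Spec_filtrar_personajes (personajes : List String) (tipo : String) (out : List String) : Prop := out = filtrar_personajes_alt personajes tipo
instance (personajes : List String) (tipo : String) (out : List String) : Decidable (Spec_filtrar_personajes personajes tipo out) := by unfold Spec_filtrar_personajes; infer_instance

-- ===== CLAIM (what is proved, stated in full; the proofs are below) =====
def Claim_equal_filtrar_personajes : Prop := ∀ (personajes : List String) (tipo : String), Dom_filtrar_personajes personajes tipo → Spec_filtrar_personajes personajes tipo (filtrar_personajes personajes tipo)

-- ===== LEMMAS AND PROOFS =====

def pA (x : String) : Bool := x == "Harry Houdini" || x == "Teller" || x == "David Blane"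
def pC (x : String) : Bool := x == "Newton" || x == "Hawking" || x == "Einstein"

lemma contains_magos (x : String) : pvMagos.contains x = pA x := by
  have h : pvMagos = ["Harry Houdini", "Teller", "David Blane"] := by decide
  rw [h]
  simp [pA, Bool.or_assoc, beq_eq_decide]

lemma contains_cientificos (x : String) : pvCientificos.contains x = pC x := by
  have h : pvCientificos = ["Newton", "Hawking", "Einstein"] := by decide
  rw [h]
  simp [pC, Bool.or_assoc, beq_eq_decide]

lemma pA_not_pC (x : String) (h : pA x = true) : pC x = false := by
  simp only [pA, Bool.or_eq_true, beq_iff_eq] at h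
  rcases h with (h | h) | h <;> subst h <;> decide

-- Invariant: the fold's state, started from (m, c, o), is those lists extended with
-- the respective filtered elements of the remainder.
lemma filtrar_fold_inv (personajes m c o : List String) :
    personajes.foldl (fun (acc : List String × List String × List String) x =>
      let (magos, cientificos, otros) := acc
      if x == "Harry Houdini" || x == "Teller" || x == "David Blane" then
        (magos ++ [x], cientificos, otros)
      else if x == "Newton" || x == "Hawking" || x == "Einstein" then
        (magos, cientificos ++ [x], otros)
      else
        (magos, cientificos, otros ++ [x])) (m, c, o)
    = (m ++ personajes.filter pA,
       c ++ personajes.filter pC,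
       o ++ personajes.filter (fun x => !pA x && !pC x)) := by
  induction personajes generalizing m c o with
  | nil => simp
  | cons x xs ih =>
    simp only [List.foldl_cons, List.filter_cons]
    by_cases h1 : (x == "Harry Houdini" || x == "Teller" || x == "David Blane") = true
    · have hpa : pA x = true := h1
      have hpc : pC x = false := pA_not_pC x hpa
      rw [if_pos h1, ih]
      simp [hpa, hpc]
    · have hpa : pA x = false := by simpa [pA] using h1
      by_cases h2 : (x == "Newton" || x == "Hawking" || x == "Einstein") = true
      · have hpc : pC x = true := h2
        rw [if_neg h1, if_pos h2, ih]
        simp [hpa, hpc]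
      · have hpc : pC x = false := by simpa [pC] using h2
        rw [if_neg h1, if_neg h2, ih]
        simp [hpa, hpc]

-- ===== VERDICT (by name: the statement is the Claim_ definition above) =====
theorem filtrar_personajes_spec : Claim_equal_filtrar_personajes := by
  intro personajes tipo _
  unfold Spec_filtrar_personajes filtrar_personajes filtrar_personajes_alt
  rw [filtrar_fold_inv]
  have hfm : personajes.filter (fun x => pvMagos.contains x) = personajes.filter pA :=
    List.filter_congr (fun x _ => contains_magos x)
  have hfc : personajes.filter (fun x => pvCientificos.contains x) = personajes.filter pC :=
    List.filter_congr (fun x _ => contains_cientificos x)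
  have hfo : personajes.filter (fun x => !pvMagos.contains x && !pvCientificos.contains x)
      = personajes.filter (fun x => !pA x && !pC x) :=
    List.filter_congr (fun x _ => by rw [contains_magos, contains_cientificos])
  by_cases h1 : (tipo == "magos") = true
  · simp only [h1, if_true, hfm, List.nil_append]
  · by_cases h2 : (tipo == "cientificos") = true
    · simp only [h1, Bool.false_eq_true, if_false, h2, if_true, hfc, List.nil_append]
    · simp only [h1, h2, Bool.false_eq_true, if_false, hfo, List.nil_append]
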